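-- pv_equiv track=rewrite | github.com/Shiv2157k/LeetCode2024 | solved_problems/string/count_binary_substrings.py | count_substrings_with_01_combinations_v1
-- ===== SOURCE A (Python) =====
-- def count_substrings_with_01_combinations_v1(s: str) -> int:
--     """
--     Approach: Without array, using curr and prev
--     T: O(N)
--     S: O(1)
--     :param s:
--     :return:
--     """
--     result, prev, curr = 0, 0, 1
--
--     for i in range(1, len(s)):
--         if s[i] != s[i - 1]:
--             # perform the count
--             result += min(prev,curr)
--             prev, curr = curr, 1
--         else:
--             curr += 1
--     return result + min(curr, prev)
-- ===== SOURCE B (Python) =====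
-- def count_substrings_with_01_combinations_v1(s: str) -> int:
--     # Center expansion: every counted substring is centered on a boundary i
--     # (s[i] != s[i-1]); expand symmetric half-length k outward while the
--     # characters keep matching the two boundary characters.
--     n = len(s)
--     result = 0
--     for i in range(1, n):
--         if s[i] != s[i - 1]:
--             k = 1
--             while i - 1 - k >= 0 and i + k < n and s[i - 1 - k] == s[i - 1] and s[i + k] == s[i]:
--                 k += 1
--             result += k
--     return result
-- ===== Notes on version B (the rewrite author's own statement) =====
-- stated objective: alternative
-- what changed: B replaces A's single streaming pass with rolling prev/curr run counters by the center-expansion algorithm: for each boundary index i with s[i] != s[i-1] an inner two-pointer while-loop expands the symmetric half-length k while the characters keep matching, and these k's are summed.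
import Mathlib
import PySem

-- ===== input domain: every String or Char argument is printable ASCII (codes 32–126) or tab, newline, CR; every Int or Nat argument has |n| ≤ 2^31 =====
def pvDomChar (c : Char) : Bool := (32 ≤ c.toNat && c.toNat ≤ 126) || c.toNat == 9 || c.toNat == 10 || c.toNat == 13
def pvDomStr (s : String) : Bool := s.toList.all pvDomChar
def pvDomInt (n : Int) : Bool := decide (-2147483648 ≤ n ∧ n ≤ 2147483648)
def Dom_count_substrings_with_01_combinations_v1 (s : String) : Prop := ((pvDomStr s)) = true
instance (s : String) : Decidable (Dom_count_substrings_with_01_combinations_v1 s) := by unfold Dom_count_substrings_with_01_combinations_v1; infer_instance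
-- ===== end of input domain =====

-- B replaces A's rolling prev/curr run counters by the center-expansion algorithm:
-- for each boundary i (s[i] != s[i-1]) a two-pointer loop expands the symmetric
-- half-length k while characters match; the k's are summed (alternative algorithm, same O(n)).


-- ===== PORT A =====
-- A's loop over i in range(1, len(s)) compares s[i] with s[i-1]; ported as the obvious
-- structural recursion carrying the previous character pc and the same state (result, prev, curr).
def pvALoop : Char → Int → Int → Int → List Char → Int
  | _, result, prev, curr, [] => result + min curr prev
  | pc, result, prev, curr, c :: rest =>
    if c ≠ pc then pvALoop c (result + min prev curr) curr 1 rest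
    else pvALoop pc result prev (curr + 1) rest

def count_substrings_with_01_combinations_v1 (s : String) : Int :=
  match s.toList with
  | [] => 0 + min (1 : Int) 0          -- loop does not run; return result + min(curr, prev)
  | c :: rest => pvALoop c 0 0 1 rest

-- ===== PORT B =====
-- Source B's inner while loop: expand the half-length k around boundary i while the
-- guards hold; the fuel argument (called with len(s)) only bounds the iteration count
-- (the loop runs at most len(s)-1 times since it requires i + k < len(s)).
def pvExpand : Nat → List Char → Int → Int → Int
  | 0, _, _, k => k
  | f+1, cs, i, k =>
    if 0 ≤ i - 1 - k ∧ i + k < (cs.length : Int) ∧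
       PySem.List.pyGetD cs (i - 1 - k) ' ' = PySem.List.pyGetD cs (i - 1) ' ' ∧
       PySem.List.pyGetD cs (i + k) ' ' = PySem.List.pyGetD cs i ' '
    then pvExpand f cs i (k + 1) else k

-- Source B: for i in range(1, n): if s[i] != s[i-1]: result += <expansion>
def count_substrings_with_01_combinations_v1_alt (s : String) : Int :=
  (PySem.List.pyRange 1 (s.toList.length : Int) 1).foldl
    (fun result i =>
      if PySem.List.pyGetD s.toList i ' ' ≠ PySem.List.pyGetD s.toList (i - 1) ' '
      then result + pvExpand s.toList.length s.toList i 1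
      else result) 0

-- ===== PRECONDITION & SPEC =====
def Spec_count_substrings_with_01_combinations_v1 (s : String) (out : Int) : Prop := out = count_substrings_with_01_combinations_v1_alt s
instance (s : String) (out : Int) : Decidable (Spec_count_substrings_with_01_combinations_v1 s out) := by unfold Spec_count_substrings_with_01_combinations_v1; infer_instance

-- ===== CLAIM (what is proved, stated in full; the proofs are below) =====
def Claim_equal_count_substrings_with_01_combinations_v1 : Prop := ∀ (s : String), Dom_count_substrings_with_01_combinations_v1 s → Spec_count_substrings_with_01_combinations_v1 s (count_substrings_with_01_combinations_v1 s)

-- ===== LEMMAS AND PROOFS =====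

-- run lengths of pc :: cs, the first run already holding `curr` characters
def pvRL : Int → Char → List Char → List Int
  | curr, _, [] => [curr]
  | curr, pc, c :: rest => if c ≠ pc then curr :: pvRL 1 c rest else pvRL (curr + 1) pc rest

-- run-length encoding of a list
def pvRLE : List Char → List Int
  | [] => []
  | c :: rest => pvRL 1 c rest

-- sum of min over adjacent pairs
def pvPairSum (gs : List Int) : Int :=
  ((gs.zip (gs.drop 1)).map (fun p => min p.1 p.2)).sum

-- B's contribution of index i, in Nat-indexed form
def pvTerm (cs : List Char) (i : Nat) : Int :=
  if cs.getD i ' ' ≠ cs.getD (i - 1) ' '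
  then pvExpand cs.length cs (i : Int) 1 else 0

def pvBN (cs : List Char) : Int :=
  ((List.range' 1 (cs.length - 1)).map (pvTerm cs)).sum

theorem pvPairSum_single (a : Int) : pvPairSum [a] = 0 := rfl

theorem pvPairSum_cons_cons (a b : Int) (t : List Int) :
    pvPairSum (a :: b :: t) = min a b + pvPairSum (b :: t) := by
  simp [pvPairSum, List.zip_cons_cons]

theorem pvRL_head (cs : List Char) : ∀ (curr : Int) (pc : Char), 1 ≤ curr →
    ∃ g t, pvRL curr pc cs = g :: t ∧ 1 ≤ g := by
  induction cs with
  | nil => intro curr pc h; exact ⟨curr, [], rfl, h⟩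
  | cons c rest ih =>
    intro curr pc h
    by_cases hc : c ≠ pc
    · exact ⟨curr, pvRL 1 c rest, by simp [pvRL, hc], h⟩
    · obtain ⟨g, t, ht, hg⟩ := ih (curr + 1) pc (by omega)
      exact ⟨g, t, by simp [pvRL, hc, ht], hg⟩

theorem pvALoop_eq (cs : List Char) : ∀ (pc : Char) (result prev curr : Int),
    pvALoop pc result prev curr cs = result + pvPairSum (prev :: pvRL curr pc cs) := by
  induction cs with
  | nil =>
    intro pc result prev curr
    simp [pvALoop, pvRL, pvPairSum_single, pvPairSum_cons_cons, min_comm]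
  | cons c rest ih =>
    intro pc result prev curr
    simp only [pvALoop, pvRL, ih]
    by_cases hc : c = pc
    · simp [hc]
    · simp only [ne_eq, hc, not_false_eq_true, if_true, pvPairSum_cons_cons]
      omega

-- A equals pairSum of the run-length encoding
theorem pvA_eq (s : String) :
    count_substrings_with_01_combinations_v1 s = pvPairSum (pvRLE s.toList) := by
  unfold count_substrings_with_01_combinations_v1
  rcases hs : s.toList with _ | ⟨c, rest⟩
  · rfl
  · show pvALoop c 0 0 1 rest = pvPairSum (pvRLE (c :: rest))
    rw [pvALoop_eq]
    obtain ⟨g, t, ht, hg⟩ := pvRL_head rest 1 c le_rfl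
    show (0 : Int) + pvPairSum (0 :: pvRL 1 c rest) = pvPairSum (pvRL 1 c rest)
    rw [ht, pvPairSum_cons_cons]
    omega

-- the expansion loop computes min L R, where L / R characterize the maximal runs
-- left of and right of the boundary i
theorem pvExpand_eq (cs : List Char) (i L R : Nat)
    (hL1 : L ≤ i)
    (hLrun : ∀ j < L, cs.getD (i - 1 - j) ' ' = cs.getD (i - 1) ' ')
    (hL2 : L = i ∨ cs.getD (i - 1 - L) ' ' ≠ cs.getD (i - 1) ' ')
    (hR1 : i + R ≤ cs.length)
    (hRrun : ∀ j < R, cs.getD (i + j) ' ' = cs.getD i ' ')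
    (hR2 : i + R = cs.length ∨ cs.getD (i + R) ' ' ≠ cs.getD i ' ') :
    ∀ (f k : Nat), k ≤ min L R → min L R ≤ k + f →
      pvExpand f cs (i : Int) (k : Int) = ((min L R : Nat) : Int) := by
  intro f
  induction f with
  | zero =>
    intro k h1 h2
    show ((k : Nat) : Int) = _
    have : k = min L R := by omega
    rw [this]
  | succ f ih =>
    intro k hk1 hk2
    by_cases hk : k < min L R
    · have h1 : (0 : Int) ≤ (i : Int) - 1 - (k : Int) := by omega
      have h2 : (i : Int) + (k : Int) < (cs.length : Int) := by omega
      have e1 : (i : Int) - 1 - (k : Int) = ((i - 1 - k : Nat) : Int) := by omega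
      have e2 : (i : Int) - 1 = ((i - 1 : Nat) : Int) := by omega
      have e3 : (i : Int) + (k : Int) = ((i + k : Nat) : Int) := by omega
      have h3 : PySem.List.pyGetD cs ((i : Int) - 1 - (k : Int)) ' ' =
          PySem.List.pyGetD cs ((i : Int) - 1) ' ' := by
        rw [e1, e2, PySem.List.pyGetD_natCast, PySem.List.pyGetD_natCast]
        exact hLrun k (by omega)
      have h4 : PySem.List.pyGetD cs ((i : Int) + (k : Int)) ' ' =
          PySem.List.pyGetD cs ((i : Int)) ' ' := by
        rw [e3, PySem.List.pyGetD_natCast, PySem.List.pyGetD_natCast]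
        exact hRrun k (by omega)
      rw [pvExpand, if_pos ⟨h1, h2, h3, h4⟩]
      have e4 : ((k : Nat) : Int) + 1 = ((k + 1 : Nat) : Int) := by omega
      rw [e4]
      exact ih (k + 1) (by omega) (by omega)
    · have hkm : k = min L R := by omega
      rw [pvExpand, if_neg, hkm]
      rintro ⟨h1, h2, h3, h4⟩
      by_cases hLR : L ≤ R
      · have hkL : k = L := by omega
        rcases hL2 with hLi | hLc
        · omega
        · have e1 : (i : Int) - 1 - (k : Int) = ((i - 1 - L : Nat) : Int) := by omega
          have e2 : (i : Int) - 1 = ((i - 1 : Nat) : Int) := by omega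
          rw [e1, e2, PySem.List.pyGetD_natCast, PySem.List.pyGetD_natCast] at h3
          exact hLc h3
      · have hkR : k = R := by omega
        rcases hR2 with hRe | hRc
        · omega
        · have e3 : (i : Int) + (k : Int) = ((i + R : Nat) : Int) := by omega
          rw [e3, PySem.List.pyGetD_natCast, PySem.List.pyGetD_natCast] at h4
          exact hRc h4

-- existence of the left-run bound L at any position 1 ≤ i
theorem pvExL (cs : List Char) : ∀ (i : Nat), 1 ≤ i → i ≤ cs.length →
    ∃ L, 1 ≤ L ∧ L ≤ i ∧ (∀ j < L, cs.getD (i - 1 - j) ' ' = cs.getD (i - 1) ' ') ∧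
      (L = i ∨ cs.getD (i - 1 - L) ' ' ≠ cs.getD (i - 1) ' ') := by
  intro i
  induction i with
  | zero => omega
  | succ i ih =>
    intro _ hlen
    rcases Nat.eq_zero_or_pos i with hi0 | hi1
    · subst hi0
      refine ⟨1, le_rfl, le_rfl, fun j hj => ?_, Or.inl rfl⟩
      have : j = 0 := by omega
      subst this; rfl
    · simp only [Nat.add_sub_cancel]
      by_cases h : cs.getD (i - 1) ' ' = cs.getD i ' '
      · obtain ⟨L, hL1, hLi, hrun, hL2⟩ := ih hi1 (by omega)
        refine ⟨L + 1, by omega, by omega, ?_, ?_⟩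
        · intro j hj
          rcases j with _ | j'
          · rfl
          · have e : i - (j' + 1) = i - 1 - j' := by omega
            rw [e, hrun j' (by omega), h]
        · rcases hL2 with hLi' | hLc
          · exact Or.inl (by omega)
          · refine Or.inr ?_
            have e : i - (L + 1) = i - 1 - L := by omega
            rw [e, ← h] at *
            exact hLc
      · refine ⟨1, le_rfl, by omega, fun j hj => ?_, Or.inr ?_⟩
        · have : j = 0 := by omega
          subst this; rfl
        · simpa using fun hh => h hh

-- existence of the right-run bound R at any position i < length
theorem pvExR (cs : List Char) : ∀ (i : Nat), i < cs.length →
    ∃ R, 1 ≤ R ∧ i + R ≤ cs.length ∧ (∀ j < R, cs.getD (i + j) ' ' = cs.getD i ' ') ∧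
      (i + R = cs.length ∨ cs.getD (i + R) ' ' ≠ cs.getD i ' ') := by
  have key : ∀ (d i : Nat), i < cs.length → cs.length - i ≤ d + 1 →
      ∃ R, 1 ≤ R ∧ i + R ≤ cs.length ∧ (∀ j < R, cs.getD (i + j) ' ' = cs.getD i ' ') ∧
        (i + R = cs.length ∨ cs.getD (i + R) ' ' ≠ cs.getD i ' ') := by
    intro d
    induction d with
    | zero =>
      intro i hi hd
      refine ⟨1, le_rfl, by omega, fun j hj => ?_, Or.inl (by omega)⟩
      have : j = 0 := by omega
      subst this; simp
    | succ d ih =>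
      intro i hi hd
      by_cases hend : i + 1 = cs.length
      · refine ⟨1, le_rfl, by omega, fun j hj => ?_, Or.inl (by omega)⟩
        have : j = 0 := by omega
        subst this; simp
      · by_cases h : cs.getD (i + 1) ' ' = cs.getD i ' '
        · obtain ⟨R, hR1, hRlen, hrun, hR2⟩ := ih (i + 1) (by omega) (by omega)
          refine ⟨R + 1, by omega, by omega, ?_, ?_⟩
          · intro j hj
            rcases j with _ | j'
            · simp
            · have e : i + (j' + 1) = (i + 1) + j' := by omega
              rw [e, hrun j' (by omega), h]
          · have e : i + (R + 1) = (i + 1) + R := by omega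
            rcases hR2 with h0 | h0
            · exact Or.inl (by omega)
            · rw [e]
              exact Or.inr (h ▸ h0)
        · refine ⟨1, le_rfl, by omega, fun j hj => ?_, Or.inr (by simpa using fun hh => h hh)⟩
          have : j = 0 := by omega
          subst this; simp
  intro i hi
  exact key (cs.length - i) i hi (by omega)

-- head of pvRL with run properties
theorem pvRL_head_spec (t : List Char) : ∀ (curr : Int) (pc : Char),
    ∃ (g : Nat) (rest : List Int), pvRL curr pc t = (curr + (g : Int)) :: rest ∧
      g ≤ t.length ∧ (∀ j < g, t.getD j ' ' = pc) ∧ (g = t.length ∨ t.getD g ' ' ≠ pc) := by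
  induction t with
  | nil =>
    intro curr pc
    exact ⟨0, [], by simp [pvRL], by simp, by omega, Or.inl rfl⟩
  | cons c t ih =>
    intro curr pc
    by_cases hc : c = pc
    · subst hc
      obtain ⟨g, rest, hrl, hle, hrun, hend⟩ := ih (curr + 1) c
      refine ⟨g + 1, rest, ?_, by simp; omega, ?_, ?_⟩
      · rw [pvRL, if_neg (by simp)]
        rw [hrl]
        congr 1
        push_cast
        ring
      · intro j hj
        rcases j with _ | j
        · rfl
        · exact hrun j (by omega)
      · rcases hend with h0 | h0
        · exact Or.inl (by simp [h0])
        · exact Or.inr (by simpa using h0)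
    · refine ⟨0, pvRL 1 c t, ?_, by omega, by omega, Or.inr (by simpa using hc)⟩
      rw [pvRL, if_pos (by simpa using hc)]
      simp

-- pvRL over a constant run followed by a different character
theorem pvRL_replicate_append (k : Nat) (a b : Char) (t : List Char) (hab : b ≠ a) :
    ∀ curr, pvRL curr a (List.replicate k a ++ b :: t) = (curr + (k : Int)) :: pvRL 1 b t := by
  induction k with
  | zero => intro curr; simp [pvRL, hab]
  | succ k ih =>
    intro curr
    show pvRL curr a (a :: (List.replicate k a ++ b :: t)) = _
    rw [pvRL, if_neg (by simp), ih (curr + 1)]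
    congr 1
    push_cast
    ring

theorem pvRL_replicate (k : Nat) (a : Char) :
    ∀ curr, pvRL curr a (List.replicate k a) = [curr + (k : Int)] := by
  induction k with
  | zero => intro curr; simp [pvRL]
  | succ k ih =>
    intro curr
    show pvRL curr a (a :: List.replicate k a) = _
    rw [pvRL, if_neg (by simp), ih (curr + 1)]
    congr 1
    push_cast
    ring

-- decomposition of a nonempty list into its first maximal run
theorem pvDecomp (cs : List Char) (h : cs ≠ []) :
    ∃ (m : Nat) (a : Char) (ds : List Char), 1 ≤ m ∧ cs = List.replicate m a ++ ds ∧
      (ds = [] ∨ ∃ b t, ds = b :: t ∧ b ≠ a) := by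
  induction cs with
  | nil => exact absurd rfl h
  | cons c cs ih =>
    rcases cs with _ | ⟨c', cs'⟩
    · exact ⟨1, c, [], le_rfl, rfl, Or.inl rfl⟩
    · obtain ⟨m, a, ds, hm, hcs, hds⟩ := ih (by simp)
      by_cases hca : c = a
      · subst hca
        exact ⟨m + 1, c, ds, by omega, by simp [List.replicate_succ, hcs], hds⟩
      · refine ⟨1, c, c' :: cs', le_rfl, by simp, Or.inr ?_⟩
        have hhead : c' = a := by
          have := congrArg (fun l => l.getD 0 ' ') hcs
          rcases hds with h0 | ⟨b, t, hbt, hba⟩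
          · subst h0
            simp at this
            rcases m with _ | m
            · omega
            · simpa [List.replicate_succ] using this
          · rcases m with _ | m
            · omega
            · simpa [List.replicate_succ] using this
        exact ⟨c', cs', rfl, by rw [hhead]; exact fun hh => hca hh.symm⟩

-- term at an index strictly inside the first run is 0
theorem pvTerm_inrun (m : Nat) (a : Char) (ds : List Char) (i : Nat)
    (h1 : 1 ≤ i) (h2 : i < m) :
    pvTerm (List.replicate m a ++ ds) i = 0 := by
  unfold pvTerm
  rw [if_neg]
  have e1 : (List.replicate m a ++ ds).getD i ' ' = a := by
    rw [List.getD_append _ _ _ _ (by simpa using h2)]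
    exact List.getD_replicate a h2
  have e2 : (List.replicate m a ++ ds).getD (i - 1) ' ' = a := by
    rw [List.getD_append _ _ _ _ (by simp; omega)]
    exact List.getD_replicate a (by omega)
  rw [e1, e2]
  simp

-- term at a shifted boundary index equals the term in the tail list
theorem pvTerm_shift (m : Nat) (a b : Char) (t : List Char) (hm : 1 ≤ m) (hab : b ≠ a)
    (i' : Nat) (h1 : 1 ≤ i') (h2 : i' < (b :: t).length) :
    pvTerm (List.replicate m a ++ b :: t) (m + i') = pvTerm (b :: t) i' := by
  have hshift : ∀ j : Nat, (List.replicate m a ++ b :: t).getD (m + j) ' ' = (b :: t).getD j ' ' := by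
    intro j
    rw [List.getD_append_right _ _ _ _ (by simp)]
    simp
  have hrepl : ∀ j : Nat, j < m → (List.replicate m a ++ b :: t).getD j ' ' = a := by
    intro j hj
    rw [List.getD_append _ _ _ _ (by simpa using hj)]
    exact List.getD_replicate a hj
  have e1 : (List.replicate m a ++ b :: t).getD (m + i') ' ' = (b :: t).getD i' ' ' := hshift i'
  have e2 : (List.replicate m a ++ b :: t).getD (m + i' - 1) ' ' = (b :: t).getD (i' - 1) ' ' := by
    have e : m + i' - 1 = m + (i' - 1) := by omega
    rw [e]
    exact hshift (i' - 1)
  unfold pvTerm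
  rw [e1, e2]
  by_cases hcond : (b :: t).getD i' ' ' ≠ (b :: t).getD (i' - 1) ' '
  · rw [if_pos hcond, if_pos hcond]
    obtain ⟨L, hLpos, hLle, hLrun, hL2⟩ := pvExL (b :: t) i' h1 (by omega)
    obtain ⟨R, hRpos, hRle, hRrun, hR2⟩ := pvExR (b :: t) i' h2
    have hlen1 : (List.replicate m a ++ b :: t).length = m + (t.length + 1) := by simp
    have hlen2 : (b :: t).length = t.length + 1 := by simp
    have hds := pvExpand_eq (b :: t) i' L R hLle hLrun hL2 hRle hRrun hR2
      (b :: t).length 1 (by omega) (by omega)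
    -- left-run head of (b :: t) below the boundary equals b
    have hhead : L = i' → (b :: t).getD (i' - 1) ' ' = b := by
      intro hLi
      have := hLrun (i' - 1) (by omega)
      have e : i' - 1 - (i' - 1) = 0 := by omega
      rw [e] at this
      simpa using this.symm
    have hcs := pvExpand_eq (List.replicate m a ++ b :: t) (m + i') L R
      (by omega)
      (by
        intro j hj
        have ea : m + i' - 1 - j = m + (i' - 1 - j) := by omega
        rw [ea, hshift, e2]
        exact hLrun j hj)
      (by
        refine Or.inr ?_
        rcases Nat.lt_or_ge L i' with hLlt | hLge
        · have ea : m + i' - 1 - L = m + (i' - 1 - L) := by omega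
          rw [ea, hshift, e2]
          rcases hL2 with h0 | h0
          · omega
          · exact h0
        · have hLi : L = i' := by omega
          have ea : m + i' - 1 - L = m - 1 := by omega
          rw [ea, hrepl (m - 1) (by omega), e2, hhead hLi]
          exact Ne.symm hab)
      (by omega)
      (by
        intro j hj
        have ea : m + i' + j = m + (i' + j) := by omega
        rw [ea, hshift, e1]
        exact hRrun j hj)
      (by
        rcases hR2 with h0 | h0
        · exact Or.inl (by omega)
        · refine Or.inr ?_
          have ea : m + i' + R = m + (i' + R) := by omega
          rw [ea, hshift, e1]
          exact h0)
      (List.replicate m a ++ b :: t).length 1 (by omega) (by omega)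
    have hcs' : pvExpand (List.replicate m a ++ b :: t).length (List.replicate m a ++ b :: t) ((m + i' : Nat) : Int) 1 = ((min L R : Nat) : Int) := by
      simpa using hcs
    have hds' : pvExpand (b :: t).length (b :: t) ((i' : Nat) : Int) 1 = ((min L R : Nat) : Int) := by
      simpa using hds
    rw [hcs', hds']
  · rw [if_neg hcond, if_neg hcond]

-- term at the boundary between the first two runs
theorem pvTerm_boundary (m : Nat) (a b : Char) (t : List Char) (hm : 1 ≤ m) (hab : b ≠ a) :
    ∃ (g : Nat) (rest : List Int),
      pvRL 1 b t = (1 + (g : Int)) :: rest ∧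
      pvTerm (List.replicate m a ++ b :: t) m = min (m : Int) (1 + (g : Int)) := by
  obtain ⟨g, rest, hrl, hgle, hrun, hend⟩ := pvRL_head_spec t 1 b
  refine ⟨g, rest, hrl, ?_⟩
  have hshift : ∀ j : Nat, (List.replicate m a ++ b :: t).getD (m + j) ' ' = (b :: t).getD j ' ' := by
    intro j
    rw [List.getD_append_right _ _ _ _ (by simp)]
    simp
  have hrepl : ∀ j : Nat, j < m → (List.replicate m a ++ b :: t).getD j ' ' = a := by
    intro j hj
    rw [List.getD_append _ _ _ _ (by simpa using hj)]
    exact List.getD_replicate a hj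
  have hbm : (List.replicate m a ++ b :: t).getD m ' ' = b := by
    have := hshift 0
    simp only [Nat.add_zero] at this
    rw [this]
    rfl
  have ham : (List.replicate m a ++ b :: t).getD (m - 1) ' ' = a := hrepl (m - 1) (by omega)
  unfold pvTerm
  rw [if_pos (by rw [hbm, ham]; exact hab)]
  have hmain := pvExpand_eq (List.replicate m a ++ b :: t) m m (g + 1)
    le_rfl
    (fun j hj => by rw [hrepl (m - 1 - j) (by omega), ham])
    (Or.inl rfl)
    (by simp; omega)
    (by
      intro j hj
      rw [hshift j, hbm]
      rcases j with _ | j'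
      · rfl
      · exact hrun j' (by omega))
    (by
      rcases hend with h0 | h0
      · exact Or.inl (by simp; omega)
      · refine Or.inr ?_
        rw [hshift (g + 1), hbm]
        exact h0)
    (List.replicate m a ++ b :: t).length 1 (by omega) (by simp; omega)
  have e : ((min m (g + 1) : Nat) : Int) = min (m : Int) (1 + (g : Int)) := by
    push_cast
    omega
  rw [← e]
  exact_mod_cast hmain

-- splitting the B-sum at the first run
theorem pvBN_split (m : Nat) (a b : Char) (t : List Char) (hm : 1 ≤ m) (hab : b ≠ a) :
    pvBN (List.replicate m a ++ b :: t) =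
      pvTerm (List.replicate m a ++ b :: t) m + pvBN (b :: t) := by
  unfold pvBN
  have hlen1 : (List.replicate m a ++ b :: t).length = m + (t.length + 1) := by simp
  have hsplit : List.range' 1 ((List.replicate m a ++ b :: t).length - 1) =
      List.range' 1 (m - 1) ++ List.range' m 1 ++ List.range' (m + 1) t.length := by
    rw [hlen1]
    have e : m + (t.length + 1) - 1 = (m - 1) + (1 + t.length) := by omega
    rw [e, ← List.range'_append_1]
    have e2 : 1 + (m - 1) = m := by omega
    rw [e2, ← List.range'_append_1]
    simp [List.append_assoc]
  rw [hsplit, List.map_append, List.map_append, List.sum_append, List.sum_append]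
  have hz : ((List.range' 1 (m - 1)).map (pvTerm (List.replicate m a ++ b :: t))).sum = 0 := by
    apply List.sum_eq_zero
    intro x hx
    obtain ⟨i, hi, rfl⟩ := List.mem_map.mp hx
    obtain ⟨hi1, hi2⟩ := List.mem_range'_1.mp hi
    exact pvTerm_inrun m a (b :: t) i hi1 (by omega)
  have hmid : ((List.range' m 1).map (pvTerm (List.replicate m a ++ b :: t))).sum =
      pvTerm (List.replicate m a ++ b :: t) m := by
    rw [List.range'_one]
    simp
  have htail : ((List.range' (m + 1) t.length).map (pvTerm (List.replicate m a ++ b :: t))).sum =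
      ((List.range' 1 ((b :: t).length - 1)).map (pvTerm (b :: t))).sum := by
    have hr : List.range' (m + 1) t.length = (List.range' 1 t.length).map (m + ·) :=
      (List.map_add_range' 1 t.length 1).symm
    rw [hr, List.map_map]
    have hlen2 : (b :: t).length - 1 = t.length := by simp
    rw [hlen2]
    refine congrArg List.sum (List.map_congr_left ?_)
    intro i' hi'
    obtain ⟨hi1, hi2⟩ := List.mem_range'_1.mp hi'
    have := pvTerm_shift m a b t hm hab i' hi1 (by simp; omega)
    simpa using this
  rw [hz, hmid, htail]
  ring

theorem pvBN_replicate (m : Nat) (a : Char) : pvBN (List.replicate m a) = 0 := by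
  unfold pvBN
  apply List.sum_eq_zero
  intro x hx
  obtain ⟨i, hi, rfl⟩ := List.mem_map.mp hx
  obtain ⟨h1, h2⟩ := List.mem_range'_1.mp hi
  have := pvTerm_inrun m a [] i h1 (by simp at h2 ⊢; omega)
  simpa using this

-- main induction: B's Nat-indexed sum equals pairSum of the RLE
theorem pvB_eq_pairSum : ∀ (n : Nat) (cs : List Char), cs.length ≤ n →
    pvBN cs = pvPairSum (pvRLE cs) := by
  intro n
  induction n with
  | zero =>
    intro cs h
    have : cs = [] := List.length_eq_zero_iff.mp (by omega)
    subst this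
    rfl
  | succ n ih =>
    intro cs h
    rcases eq_or_ne cs [] with hnil | hne
    · subst hnil; rfl
    · obtain ⟨m, a, ds, hm, hcs, hds⟩ := pvDecomp cs hne
      have hrep : List.replicate m a = a :: List.replicate (m - 1) a := by
        conv_lhs => rw [show m = (m - 1) + 1 by omega]
        rw [List.replicate_succ]
      rcases hds with hds0 | ⟨b, t, hbt, hab⟩
      · subst hds0
        rw [List.append_nil] at hcs
        subst hcs
        rw [pvBN_replicate]
        show (0 : Int) = pvPairSum (pvRLE (List.replicate m a))
        rw [hrep]
        show (0 : Int) = pvPairSum (pvRL 1 a (List.replicate (m - 1) a))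
        rw [pvRL_replicate, pvPairSum_single]
      · subst hbt
        subst hcs
        rw [pvBN_split m a b t hm hab]
        obtain ⟨g, rest, hrl, hterm⟩ := pvTerm_boundary m a b t hm hab
        have hih : pvBN (b :: t) = pvPairSum (pvRL 1 b t) := by
          have hlen : (List.replicate m a ++ b :: t).length = m + (t.length + 1) := by simp
          exact ih (b :: t) (by simp at h ⊢; omega)
        have hrle : pvRLE (List.replicate m a ++ b :: t) = (m : Int) :: pvRL 1 b t := by
          rw [hrep, List.cons_append]
          show pvRL 1 a (List.replicate (m - 1) a ++ b :: t) = _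
          rw [pvRL_replicate_append (m - 1) a b t hab 1]
          congr 1
          omega
        rw [hrle, hrl, pvPairSum_cons_cons, hterm, hih, hrl]

-- bridge: the port of B equals the Nat-indexed sum
-- the foldl-with-guard of the port, as init + a sum of guarded terms
theorem pvFoldlIf {α : Type} (p : α → Prop) [DecidablePred p] (f : α → Int) :
    ∀ (l : List α) (init : Int),
      l.foldl (fun r x => if p x then r + f x else r) init
        = init + (l.map (fun x => if p x then f x else 0)).sum := by
  intro l
  induction l with
  | nil => intro init; simp
  | cons x l ihl =>
    intro init
    rw [List.foldl_cons, ihl, List.map_cons, List.sum_cons]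
    split_ifs <;> ring

theorem pvAlt_eq (s : String) :
    count_substrings_with_01_combinations_v1_alt s = pvBN s.toList := by
  unfold count_substrings_with_01_combinations_v1_alt pvBN
  rw [PySem.List.pyRange_one, List.foldl_map,
    pvFoldlIf (fun k : Nat => PySem.List.pyGetD s.toList (1 + (k : Int)) ' ' ≠ PySem.List.pyGetD s.toList (1 + (k : Int) - 1) ' ')
      (fun k : Nat => pvExpand s.toList.length s.toList (1 + (k : Int)) 1), zero_add]
  rw [List.range'_eq_map_range, List.map_map]
  have e0 : ((s.toList.length : Int) - 1).toNat = s.toList.length - 1 := by omega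
  rw [e0]
  refine congrArg List.sum (List.map_congr_left ?_)
  intro k hk
  show (if PySem.List.pyGetD s.toList (1 + (k : Int)) ' ' ≠ PySem.List.pyGetD s.toList (1 + (k : Int) - 1) ' '
        then pvExpand s.toList.length s.toList (1 + (k : Int)) 1 else 0) = pvTerm s.toList (1 + k)
  unfold pvTerm
  have e2 : (1 + (k : Int)) - 1 = ((k : Nat) : Int) := by omega
  have e1 : (1 + (k : Int)) = ((1 + k : Nat) : Int) := by omega
  rw [e2, e1, PySem.List.pyGetD_natCast, PySem.List.pyGetD_natCast]
  have e3 : 1 + k - 1 = k := by omega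
  rw [e3]

-- ===== VERDICT (by name: the statement is the Claim_ definition above) =====
theorem count_substrings_with_01_combinations_v1_spec : Claim_equal_count_substrings_with_01_combinations_v1 := by
  intro s _
  unfold Spec_count_substrings_with_01_combinations_v1
  rw [pvA_eq, pvAlt_eq, pvB_eq_pairSum s.toList.length s.toList le_rfl]
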